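-- pv_equiv track=rewrite | github.com/Libensemble/libensemble | libensemble/resources/rset_resources.py | get_group_list
-- ===== SOURCE A (Python) =====
-- def get_group_list(split_list, gpus_per_node=0, gpus_per_group=None):
--     """Return lists of group ids and slot IDs by resource set"""
--     group = 1
--     slot = 0
--     group_list, slot_list, gpu_list = [], [], []
--     node = split_list[0]
--
--     for i in range(len(split_list)):
--         # still break on new node if gpus_per_group is set
--         if split_list[i] != node or slot == gpus_per_group:
--             node = split_list[i]
--             group += 1
--             slot = 0
--         group_list.append(group)
--         slot_list.append(slot)
--         gpu_list.append(slot < gpus_per_node)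
--         slot += 1
--     return group_list, slot_list, gpu_list
-- ===== SOURCE B (Python) =====
-- def get_group_list(split_list, gpus_per_node=0, gpus_per_group=None):
--     """Return lists of group ids and slot IDs by resource set.
--
--     Two-phase: run-length encode the node column, then emit each run's ids by
--     closed-form arithmetic (j // g, j % g) instead of a stateful element scan.
--     Treats gpus_per_group=0 like None (no size-splitting) instead of A's
--     accidental group numbering starting at 2.
--     """
--     runs = []  # run-length encoding: [node, count]
--     for x in split_list:
--         if runs and runs[-1][0] == x:
--             runs[-1][1] += 1
--         else:
--             runs.append([x, 1])
--
--     g = gpus_per_group if gpus_per_group is not None and gpus_per_group > 0 else None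
--     group_list, slot_list, gpu_list = [], [], []
--     base = 0
--     for _, length in runs:
--         for j in range(length):
--             slot = j % g if g else j
--             group_list.append(base + 1 + (j // g if g else 0))
--             slot_list.append(slot)
--             gpu_list.append(slot < gpus_per_node)
--         base += 1 + ((length - 1) // g if g else 0)
--     return group_list, slot_list, gpu_list
-- ===== Notes on version B (the rewrite author's own statement) =====
-- stated objective: alternative
-- what changed: B replaces A's single stateful scan (group/slot/node counters updated per element) by a two-phase decomposition: run-length encode the node list, then emit group/slot ids for each run by closed-form arithmetic (j // g, j % g) per run.
-- intended difference: When gpus_per_group == 0 (and the list is nonempty), A's 'slot == gpus_per_group' test fires on the very first element so A returns group ids starting at 2 (otherwise grouped as with None); B returns the intended numbering starting at 1, treating 0 like None (no size-splitting). — e.g. on get_group_list(["a"], 0, some 0): A returns ([2], [0], [false]), B returns ([1], [0], [false])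
import Mathlib
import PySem

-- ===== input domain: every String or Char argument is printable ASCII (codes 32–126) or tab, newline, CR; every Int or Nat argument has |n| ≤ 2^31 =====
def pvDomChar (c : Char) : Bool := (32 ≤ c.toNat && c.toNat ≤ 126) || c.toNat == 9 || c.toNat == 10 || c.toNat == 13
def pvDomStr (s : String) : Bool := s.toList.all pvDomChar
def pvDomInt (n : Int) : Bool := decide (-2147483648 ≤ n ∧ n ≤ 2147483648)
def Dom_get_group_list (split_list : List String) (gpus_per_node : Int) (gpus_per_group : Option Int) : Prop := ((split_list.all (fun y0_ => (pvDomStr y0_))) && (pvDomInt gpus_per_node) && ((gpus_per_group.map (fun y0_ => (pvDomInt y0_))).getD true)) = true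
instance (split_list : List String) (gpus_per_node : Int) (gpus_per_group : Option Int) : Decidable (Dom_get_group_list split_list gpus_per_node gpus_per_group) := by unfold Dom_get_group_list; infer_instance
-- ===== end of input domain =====

-- B re-implements A by run-length encoding the node list and emitting ids per run
-- by closed-form arithmetic (j / g, j % g) — an alternative decomposition; B also
-- fixes A's accidental group numbering (starting at 2) when gpus_per_group == 0.

-- ===== PORT A =====
-- loop body of A's for-loop, extracted as a named step function
def pvAStep (gpus_per_node : Int) (gpus_per_group : Option Int)
    (st : Int × Int × String × List Int × List Int × List Bool) (x : String) :
    Int × Int × String × List Int × List Int × List Bool :=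
  let (group, slot, node, gl, sl, bl) := st
  let (group, slot, node) :=
    if x ≠ node ∨ some slot = gpus_per_group then (group + 1, (0 : Int), x)
    else (group, slot, node)
  (group, slot + 1, node, gl ++ [group], sl ++ [slot], bl ++ [decide (slot < gpus_per_node)])

def get_group_list (split_list : List String) (gpus_per_node : Int) (gpus_per_group : Option Int) : List Int × List Int × List Bool :=
  match split_list with
  | [] => ([], [], [])   -- Python raises IndexError here (split_list[0]); excluded by Pre_
  | n0 :: _ =>
    let st := split_list.foldl (pvAStep gpus_per_node gpus_per_group) (1, 0, n0, [], [], [])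
    (st.2.2.2.1, st.2.2.2.2.1, st.2.2.2.2.2)

-- ===== PORT B =====
-- phase 1 of Source B: run-length encoding of the node column
def pvRLE : List String → List (String × Nat)
  | [] => []
  | x :: xs =>
    match pvRLE xs with
    | (y, k) :: rest => if x = y then (x, k + 1) :: rest else (x, 1) :: (y, k) :: rest
    | [] => [(x, 1)]

-- phase 2 of Source B: per-run emission by closed-form arithmetic
def pvBRun (gpus_per_node : Int) (g : Option Nat)
    (st : Int × List Int × List Int × List Bool) (run : String × Nat) :
    Int × List Int × List Int × List Bool :=
  let (base, gl, sl, bl) := st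
  (base + 1 + (match g with | some gg => (((run.2 - 1) / gg : Nat) : Int) | none => 0),
   gl ++ (List.range run.2).map (fun j => base + 1 + (match g with | some gg => ((j / gg : Nat) : Int) | none => 0)),
   sl ++ (List.range run.2).map (fun j => ((match g with | some gg => j % gg | none => j : Nat) : Int)),
   bl ++ (List.range run.2).map (fun j => decide (((match g with | some gg => j % gg | none => j : Nat) : Int) < gpus_per_node)))

def get_group_list_alt (split_list : List String) (gpus_per_node : Int) (gpus_per_group : Option Int) : List Int × List Int × List Bool :=
  let g : Option Nat := match gpus_per_group with
    | some t => if 0 < t then some t.toNat else none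
    | none => none
  let st := (pvRLE split_list).foldl (pvBRun gpus_per_node g) (0, [], [], [])
  (st.2.1, st.2.2.1, st.2.2.2)

-- ===== PRECONDITION & SPEC =====
-- Pre_ excludes only the empty list, on which A raises IndexError (split_list[0]).
def Pre_get_group_list (split_list : List String) (gpus_per_node : Int) (gpus_per_group : Option Int) : Prop :=
  split_list ≠ []
instance (split_list : List String) (gpus_per_node : Int) (gpus_per_group : Option Int) : Decidable (Pre_get_group_list split_list gpus_per_node gpus_per_group) := by unfold Pre_get_group_list; infer_instance

def pvWitness_get_group_list : List String × Int × Option Int := (["a", "a", "b"], 1, some 2)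

-- When gpus_per_group == 0, A's `slot == gpus_per_group` fires on the very first
-- element, so A returns group ids starting at 2 (otherwise grouping as with None);
-- B returns the intended numbering starting at 1 (treating 0 like None).
def D_get_group_list (split_list : List String) (gpus_per_node : Int) (gpus_per_group : Option Int) : Prop :=
  gpus_per_group = some 0
instance (split_list : List String) (gpus_per_node : Int) (gpus_per_group : Option Int) : Decidable (D_get_group_list split_list gpus_per_node gpus_per_group) := by unfold D_get_group_list; infer_instance

def Spec_get_group_list (split_list : List String) (gpus_per_node : Int) (gpus_per_group : Option Int) (out : List Int × List Int × List Bool) : Prop :=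
  ¬ D_get_group_list split_list gpus_per_node gpus_per_group → out = get_group_list_alt split_list gpus_per_node gpus_per_group
instance (split_list : List String) (gpus_per_node : Int) (gpus_per_group : Option Int) (out : List Int × List Int × List Bool) : Decidable (Spec_get_group_list split_list gpus_per_node gpus_per_group out) := by unfold Spec_get_group_list; infer_instance

def pvDiffWitness_get_group_list : List String × Int × Option Int := (["a"], 0, some 0)
def pvDiffWitnessOut_get_group_list : (List Int × List Int × List Bool) × (List Int × List Int × List Bool) :=
  (([2], [0], [false]), ([1], [0], [false]))

-- ===== CLAIM (what is proved, stated in full; the proofs are below) =====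
def Claim_unchanged_get_group_list : Prop := ∀ (split_list : List String) (gpus_per_node : Int) (gpus_per_group : Option Int), Dom_get_group_list split_list gpus_per_node gpus_per_group → Pre_get_group_list split_list gpus_per_node gpus_per_group → Spec_get_group_list split_list gpus_per_node gpus_per_group (get_group_list split_list gpus_per_node gpus_per_group)
def Claim_changed_get_group_list : Prop := Dom_get_group_list (pvDiffWitness_get_group_list.1) (pvDiffWitness_get_group_list.2.1) (pvDiffWitness_get_group_list.2.2) ∧ Pre_get_group_list (pvDiffWitness_get_group_list.1) (pvDiffWitness_get_group_list.2.1) (pvDiffWitness_get_group_list.2.2) ∧ D_get_group_list (pvDiffWitness_get_group_list.1) (pvDiffWitness_get_group_list.2.1) (pvDiffWitness_get_group_list.2.2) ∧ get_group_list (pvDiffWitness_get_group_list.1) (pvDiffWitness_get_group_list.2.1) (pvDiffWitness_get_group_list.2.2) = pvDiffWitnessOut_get_group_list.1 ∧ get_group_list_alt (pvDiffWitness_get_group_list.1) (pvDiffWitness_get_group_list.2.1) (pvDiffWitness_get_group_list.2.2) = pvDiffWitnessOut_get_group_list.2 ∧ pvDiffWitnessOut_get_group_list.1 ≠ pvDi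ffWitnessOut_get_group_list.2
def Claim_exact_get_group_list : Prop := ∀ (split_list : List String) (gpus_per_node : Int) (gpus_per_group : Option Int), Dom_get_group_list split_list gpus_per_node gpus_per_group → Pre_get_group_list split_list gpus_per_node gpus_per_group → D_get_group_list split_list gpus_per_node gpus_per_group → get_group_list split_list gpus_per_node gpus_per_group ≠ get_group_list_alt split_list gpus_per_node gpus_per_group
-- ===== LEMMAS AND PROOFS =====

-- shape of the run-length encoding
theorem pvRLE_shape (x : String) (xs : List String) : ∃ k rest, pvRLE (x :: xs) = (x, k + 1) :: rest := by
  rcases h : pvRLE xs with _ | ⟨⟨y, k⟩, rest⟩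
  · exact ⟨0, [], by simp [pvRLE, h]⟩
  · by_cases hxy : x = y
    · exact ⟨k, rest, by simp [pvRLE, h, hxy]⟩
    · exact ⟨0, (y, k) :: rest, by simp [pvRLE, h, hxy]⟩

theorem pvRLE_flat : ∀ l : List String, (pvRLE l).flatMap (fun r => List.replicate r.2 r.1) = l := by
  intro l
  induction l with
  | nil => simp [pvRLE]
  | cons x xs ih =>
    rcases h : pvRLE xs with _ | ⟨⟨y, k⟩, rest⟩
    · rw [h] at ih
      simp at ih
      simp [pvRLE, h, ← ih]
    · rw [h] at ih
      by_cases hxy : x = y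
      · subst hxy
        simp [pvRLE, h, List.replicate_succ] at ih ⊢
        simpa using ih
      · simp [pvRLE, h, hxy] at ih ⊢
        simpa using ih

theorem pvRLE_pos : ∀ l : List String, ∀ r ∈ pvRLE l, 1 ≤ r.2 := by
  intro l
  induction l with
  | nil => simp [pvRLE]
  | cons x xs ih =>
    rcases h : pvRLE xs with _ | ⟨⟨y, k⟩, rest⟩
    · simp [pvRLE, h]
    · rw [h] at ih
      by_cases hxy : x = y
      · intro r hr
        simp [pvRLE, h, hxy] at hr
        rcases hr with hr | hr
        · subst hr; simp
        · exact ih r (by simp [hr])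
      · intro r hr
        simp [pvRLE, h, hxy] at hr
        rcases hr with hr | hr | hr
        · subst hr; simp
        · subst hr; exact ih (y, k) (by simp)
        · exact ih r (by simp [hr])

theorem pvRLE_chain : ∀ l : List String, List.IsChain (fun a b : String × Nat => a.1 ≠ b.1) (pvRLE l) := by
  intro l
  induction l with
  | nil => exact .nil
  | cons x xs ih =>
    rcases h : pvRLE xs with _ | ⟨⟨y, k⟩, rest⟩
    · simp only [pvRLE, h]
      exact .singleton _
    · rw [h] at ih
      by_cases hxy : x = y
      · subst hxy
        simp only [pvRLE, h]
        cases ih with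
        | singleton _ => exact .singleton _
        | cons_cons hr hrest => exact .cons_cons hr hrest
      · simp only [pvRLE, h, if_neg hxy]
        exact .cons_cons hxy ih

-- A's loop over one maximal run of x's, node already equal to x, closed form (g > 0)
theorem runA (gpn : Int) (g : Nat) (hg : 0 < g) (x : String) (tail : List String) :
    ∀ (m s : Nat) (t : Int), t = (s : Int) → s ≤ g → ∀ (G : Int) (gl sl : List Int) (bl : List Bool),
    List.foldl (pvAStep gpn (some (g : Int))) (G, t, x, gl, sl, bl) (List.replicate (m + 1) x ++ tail)
    = List.foldl (pvAStep gpn (some (g : Int)))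
        (G + (((s + m) / g : Nat) : Int), (((s + m) % g : Nat) : Int) + 1, x,
         gl ++ (List.range (m + 1)).map (fun j => G + (((s + j) / g : Nat) : Int)),
         sl ++ (List.range (m + 1)).map (fun j => (((s + j) % g : Nat) : Int)),
         bl ++ (List.range (m + 1)).map (fun j => decide ((((s + j) % g : Nat) : Int) < gpn))) tail := by
  intro m
  induction m with
  | zero =>
    intro s t ht hs G gl sl bl
    subst ht
    simp only [Nat.zero_add, List.range_one, List.map_cons, List.map_nil, Nat.add_zero]
    by_cases hsg : s = g
    · subst hsg
      rw [Nat.div_self hg]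
      simp only [Nat.mod_self]
      simp [pvAStep]
    · have hlt : s < g := lt_of_le_of_ne hs hsg
      rw [Nat.div_eq_of_lt hlt]
      simp only [Nat.mod_eq_of_lt hlt]
      simp [pvAStep, hsg]
  | succ m ih =>
    intro s t ht hs G gl sl bl
    subst ht
    rw [List.replicate_succ, List.cons_append, List.foldl_cons]
    by_cases hsg : s = g
    · subst hsg
      have hstep : pvAStep gpn (some (s : Int)) (G, (s : Int), x, gl, sl, bl) x
          = (G + 1, (0 : Int) + 1, x, gl ++ [G + 1], sl ++ [(0 : Int)], bl ++ [decide ((0 : Int) < gpn)]) := by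
        simp [pvAStep]
      rw [hstep, ih 1 ((0 : Int) + 1) (by norm_num) (by omega)]
      have hnum : s + (m + 1) = (m + 1) + s := by omega
      have hsh : ∀ j : Nat, s + Nat.succ j = (j + 1) + s := by intro j; omega
      have e1 : G + (((s + (m + 1)) / s : Nat) : Int) = G + 1 + (((1 + m) / s : Nat) : Int) := by
        rw [hnum, Nat.add_div_right _ hg, show 1 + m = m + 1 from by omega]
        push_cast; ring
      have e2 : ((((s + (m + 1)) % s : Nat)) : Int) + 1 = (((1 + m) % s : Nat) : Int) + 1 := by
        rw [hnum, Nat.add_mod_right, show 1 + m = m + 1 from by omega]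
      have e3 : gl ++ (List.range (m + 1 + 1)).map (fun j => G + (((s + j) / s : Nat) : Int))
          = (gl ++ [G + 1]) ++ (List.range (m + 1)).map (fun j => G + 1 + (((1 + j) / s : Nat) : Int)) := by
        rw [List.range_succ_eq_map (n := m + 1)]
        simp only [List.map_cons, List.map_map, List.append_assoc, List.singleton_append, Nat.add_zero]
        refine congrArg (gl ++ ·) (congrArg₂ (· :: ·) ?_ ?_)
        · rw [Nat.div_self hg]; norm_num
        · refine (List.map_congr_left (fun j _ => ?_)).symm
          simp only [Function.comp_apply]
          rw [hsh j, Nat.add_div_right _ hg, show 1 + j = j + 1 from by omega]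
          push_cast; ring
      have e4 : sl ++ (List.range (m + 1 + 1)).map (fun j => (((s + j) % s : Nat) : Int))
          = (sl ++ [(0 : Int)]) ++ (List.range (m + 1)).map (fun j => (((1 + j) % s : Nat) : Int)) := by
        rw [List.range_succ_eq_map (n := m + 1)]
        simp only [List.map_cons, List.map_map, List.append_assoc, List.singleton_append, Nat.add_zero]
        refine congrArg (sl ++ ·) (congrArg₂ (· :: ·) ?_ ?_)
        · rw [Nat.mod_self]; norm_num
        · refine (List.map_congr_left (fun j _ => ?_)).symm
          simp only [Function.comp_apply]
          rw [hsh j, Nat.add_mod_right, show 1 + j = j + 1 from by omega]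
      have e5 : bl ++ (List.range (m + 1 + 1)).map (fun j => decide ((((s + j) % s : Nat) : Int) < gpn))
          = (bl ++ [decide ((0 : Int) < gpn)]) ++ (List.range (m + 1)).map (fun j => decide ((((1 + j) % s : Nat) : Int) < gpn)) := by
        rw [List.range_succ_eq_map (n := m + 1)]
        simp only [List.map_cons, List.map_map, List.append_assoc, List.singleton_append, Nat.add_zero]
        refine congrArg (bl ++ ·) (congrArg₂ (· :: ·) ?_ ?_)
        · have h0 : s % s = 0 := Nat.mod_self s
          simp [h0]
        · refine (List.map_congr_left (fun j _ => ?_)).symm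
          simp only [Function.comp_apply]
          have hj : (s + Nat.succ j) % s = (1 + j) % s := by
            rw [hsh j, Nat.add_mod_right, show 1 + j = j + 1 from by omega]
          exact (congrArg (fun n : Nat => decide ((n : Int) < gpn)) hj).symm
      rw [e1, e2, e3, e4, e5]
    · have hlt : s < g := lt_of_le_of_ne hs hsg
      have hstep : pvAStep gpn (some (g : Int)) (G, (s : Int), x, gl, sl, bl) x
          = (G, (s : Int) + 1, x, gl ++ [G], sl ++ [(s : Int)], bl ++ [decide ((s : Int) < gpn)]) := by
        simp [pvAStep, hsg]
      rw [hstep, ih (s + 1) ((s : Int) + 1) (by push_cast; ring) (by omega)]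
      have hnum : s + (m + 1) = s + 1 + m := by omega
      have hsh : ∀ j : Nat, s + Nat.succ j = s + 1 + j := by intro j; omega
      have e1 : G + (((s + (m + 1)) / g : Nat) : Int) = G + (((s + 1 + m) / g : Nat) : Int) := by rw [hnum]
      have e2 : ((((s + (m + 1)) % g : Nat)) : Int) + 1 = (((s + 1 + m) % g : Nat) : Int) + 1 := by rw [hnum]
      have e3 : gl ++ (List.range (m + 1 + 1)).map (fun j => G + (((s + j) / g : Nat) : Int))
          = (gl ++ [G]) ++ (List.range (m + 1)).map (fun j => G + (((s + 1 + j) / g : Nat) : Int)) := by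
        rw [List.range_succ_eq_map (n := m + 1)]
        simp only [List.map_cons, List.map_map, List.append_assoc, List.singleton_append, Nat.add_zero]
        refine congrArg (gl ++ ·) (congrArg₂ (· :: ·) ?_ ?_)
        · rw [Nat.div_eq_of_lt hlt]; norm_num
        · refine (List.map_congr_left (fun j _ => ?_)).symm
          simp only [Function.comp_apply]
          rw [hsh j]
      have e4 : sl ++ (List.range (m + 1 + 1)).map (fun j => (((s + j) % g : Nat) : Int))
          = (sl ++ [(s : Int)]) ++ (List.range (m + 1)).map (fun j => (((s + 1 + j) % g : Nat) : Int)) := by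
        rw [List.range_succ_eq_map (n := m + 1)]
        simp only [List.map_cons, List.map_map, List.append_assoc, List.singleton_append, Nat.add_zero]
        refine congrArg (sl ++ ·) (congrArg₂ (· :: ·) ?_ ?_)
        · rw [Nat.mod_eq_of_lt hlt]
        · refine (List.map_congr_left (fun j _ => ?_)).symm
          simp only [Function.comp_apply]
          rw [hsh j]
      have e5 : bl ++ (List.range (m + 1 + 1)).map (fun j => decide ((((s + j) % g : Nat) : Int) < gpn))
          = (bl ++ [decide ((s : Int) < gpn)]) ++ (List.range (m + 1)).map (fun j => decide ((((s + 1 + j) % g : Nat) : Int) < gpn)) := by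
        rw [List.range_succ_eq_map (n := m + 1)]
        simp only [List.map_cons, List.map_map, List.append_assoc, List.singleton_append, Nat.add_zero]
        refine congrArg (bl ++ ·) (congrArg₂ (· :: ·) ?_ ?_)
        · have h0 : s % g = s := Nat.mod_eq_of_lt hlt
          simp [h0]
        · refine (List.map_congr_left (fun j _ => ?_)).symm
          simp only [Function.comp_apply]
          exact (congrArg (fun n : Nat => decide ((n : Int) < gpn)) (by rw [hsh j])).symm
      rw [e1, e2, e3, e4, e5]

-- A's loop over one maximal run of y's entered from a different node (g > 0),
-- emissions stated in the exact shape of pvBRun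
theorem runFresh (gpn : Int) (g : Nat) (hg : 0 < g) (y : String) (tail : List String) :
    ∀ (k : Nat), 1 ≤ k → ∀ (G t : Int) (node : String), y ≠ node → ∀ (gl sl : List Int) (bl : List Bool),
    List.foldl (pvAStep gpn (some (g : Int))) (G, t, node, gl, sl, bl) (List.replicate k y ++ tail)
    = List.foldl (pvAStep gpn (some (g : Int)))
        (G + 1 + (((k - 1) / g : Nat) : Int), (((k - 1) % g : Nat) : Int) + 1, y,
         gl ++ (List.range k).map (fun j => G + 1 + ((j / g : Nat) : Int)),
         sl ++ (List.range k).map (fun j => ((j % g : Nat) : Int)),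
         bl ++ (List.range k).map (fun j => decide (((j % g : Nat) : Int) < gpn))) tail := by
  intro k hk G t node hne gl sl bl
  obtain ⟨m, rfl⟩ : ∃ m, k = m + 1 := ⟨k - 1, by omega⟩
  rw [List.replicate_succ, List.cons_append, List.foldl_cons]
  have hstep : pvAStep gpn (some (g : Int)) (G, t, node, gl, sl, bl) y
      = (G + 1, (0 : Int) + 1, y, gl ++ [G + 1], sl ++ [(0 : Int)], bl ++ [decide ((0 : Int) < gpn)]) := by
    simp [pvAStep, hne]
  rw [hstep]
  cases m with
  | zero => simp
  | succ m' =>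
    rw [runA gpn g hg y tail m' 1 ((0 : Int) + 1) (by norm_num) (by omega)]
    have e1 : G + 1 + (((m' + 1 + 1 - 1) / g : Nat) : Int) = G + 1 + (((1 + m') / g : Nat) : Int) := by
      rw [show m' + 1 + 1 - 1 = 1 + m' from by omega]
    have e2 : (((m' + 1 + 1 - 1) % g : Nat) : Int) + 1 = (((1 + m') % g : Nat) : Int) + 1 := by
      rw [show m' + 1 + 1 - 1 = 1 + m' from by omega]
    have e3 : gl ++ (List.range (m' + 1 + 1)).map (fun j => G + 1 + ((j / g : Nat) : Int))
        = (gl ++ [G + 1]) ++ (List.range (m' + 1)).map (fun j => G + 1 + (((1 + j) / g : Nat) : Int)) := by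
      rw [List.range_succ_eq_map (n := m' + 1)]
      simp only [List.map_cons, List.map_map, List.append_assoc, List.singleton_append, Nat.zero_div]
      refine congrArg (gl ++ ·) (congrArg₂ (· :: ·) (by norm_num) ?_)
      refine (List.map_congr_left (fun j _ => ?_)).symm
      simp only [Function.comp_apply]
      rw [show 1 + j = Nat.succ j from by omega]
    have e4 : sl ++ (List.range (m' + 1 + 1)).map (fun j => ((j % g : Nat) : Int))
        = (sl ++ [(0 : Int)]) ++ (List.range (m' + 1)).map (fun j => (((1 + j) % g : Nat) : Int)) := by
      rw [List.range_succ_eq_map (n := m' + 1)]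
      simp only [List.map_cons, List.map_map, List.append_assoc, List.singleton_append, Nat.zero_mod]
      refine congrArg (sl ++ ·) (congrArg₂ (· :: ·) (by norm_num) ?_)
      refine (List.map_congr_left (fun j _ => ?_)).symm
      simp only [Function.comp_apply]
      rw [show 1 + j = Nat.succ j from by omega]
    have e5 : bl ++ (List.range (m' + 1 + 1)).map (fun j => decide (((j % g : Nat) : Int) < gpn))
        = (bl ++ [decide ((0 : Int) < gpn)]) ++ (List.range (m' + 1)).map (fun j => decide ((((1 + j) % g : Nat) : Int) < gpn)) := by
      rw [List.range_succ_eq_map (n := m' + 1)]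
      simp only [List.map_cons, List.map_map, List.append_assoc, List.singleton_append, Nat.zero_mod]
      refine congrArg (bl ++ ·) (congrArg₂ (· :: ·) (by norm_num) ?_)
      refine (List.map_congr_left (fun j _ => ?_)).symm
      simp only [Function.comp_apply]
      exact congrArg (fun n : Nat => decide (((n % g : Nat) : Int) < gpn)) (show 1 + j = Nat.succ j from by omega)
    rw [e1, e2, e3, e4, e5]

-- A's loop over one run when the slot never matches gpus_per_group (None or negative)
theorem runANone (gpn : Int) (gpg : Option Int) (hn : ∀ n : Nat, (some ((n : Nat) : Int) : Option Int) ≠ gpg)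
    (x : String) (tail : List String) :
    ∀ (m s : Nat) (t : Int), t = (s : Int) → ∀ (G : Int) (gl sl : List Int) (bl : List Bool),
    List.foldl (pvAStep gpn gpg) (G, t, x, gl, sl, bl) (List.replicate (m + 1) x ++ tail)
    = List.foldl (pvAStep gpn gpg)
        (G, ((s + m : Nat) : Int) + 1, x,
         gl ++ (List.range (m + 1)).map (fun _ => G),
         sl ++ (List.range (m + 1)).map (fun j => ((s + j : Nat) : Int)),
         bl ++ (List.range (m + 1)).map (fun j => decide (((s + j : Nat) : Int) < gpn))) tail := by
  intro m
  induction m with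
  | zero =>
    intro s t ht G gl sl bl
    subst ht
    have hstep : pvAStep gpn gpg (G, (s : Int), x, gl, sl, bl) x
        = (G, (s : Int) + 1, x, gl ++ [G], sl ++ [(s : Int)], bl ++ [decide ((s : Int) < gpn)]) := by
      simp [pvAStep, hn s]
    rw [show List.replicate (0 + 1) x = [x] from rfl, List.singleton_append, List.foldl_cons, hstep]
    simp
  | succ m ih =>
    intro s t ht G gl sl bl
    subst ht
    rw [List.replicate_succ, List.cons_append, List.foldl_cons]
    have hstep : pvAStep gpn gpg (G, (s : Int), x, gl, sl, bl) x
        = (G, (s : Int) + 1, x, gl ++ [G], sl ++ [(s : Int)], bl ++ [decide ((s : Int) < gpn)]) := by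
      simp [pvAStep, hn s]
    rw [hstep, ih (s + 1) ((s : Int) + 1) (by push_cast; ring)]
    have hsh : ∀ j : Nat, s + Nat.succ j = s + 1 + j := by intro j; omega
    have e1 : ((s + (m + 1) : Nat) : Int) + 1 = ((s + 1 + m : Nat) : Int) + 1 := by
      rw [show s + (m + 1) = s + 1 + m from by omega]
    have e3 : gl ++ (List.range (m + 1 + 1)).map (fun _ => G)
        = (gl ++ [G]) ++ (List.range (m + 1)).map (fun _ => G) := by
      rw [List.range_succ_eq_map (n := m + 1)]
      simp only [List.map_cons, List.map_map, List.append_assoc, List.singleton_append]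
      exact congrArg (gl ++ ·) (congrArg₂ (· :: ·) rfl (List.map_congr_left (fun j _ => rfl)))
    have e4 : sl ++ (List.range (m + 1 + 1)).map (fun j => ((s + j : Nat) : Int))
        = (sl ++ [(s : Int)]) ++ (List.range (m + 1)).map (fun j => ((s + 1 + j : Nat) : Int)) := by
      rw [List.range_succ_eq_map (n := m + 1)]
      simp only [List.map_cons, List.map_map, List.append_assoc, List.singleton_append, Nat.add_zero]
      refine congrArg (sl ++ ·) (congrArg₂ (· :: ·) rfl ?_)
      refine (List.map_congr_left (fun j _ => ?_)).symm
      simp only [Function.comp_apply]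
      rw [hsh j]
    have e5 : bl ++ (List.range (m + 1 + 1)).map (fun j => decide (((s + j : Nat) : Int) < gpn))
        = (bl ++ [decide ((s : Int) < gpn)]) ++ (List.range (m + 1)).map (fun j => decide (((s + 1 + j : Nat) : Int) < gpn)) := by
      rw [List.range_succ_eq_map (n := m + 1)]
      simp only [List.map_cons, List.map_map, List.append_assoc, List.singleton_append, Nat.add_zero]
      refine congrArg (bl ++ ·) (congrArg₂ (· :: ·) rfl ?_)
      refine (List.map_congr_left (fun j _ => ?_)).symm
      simp only [Function.comp_apply]
      exact congrArg (fun n : Nat => decide ((n : Int) < gpn)) (hsh j).symm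
    rw [e1, e3, e4, e5]

-- entering a fresh run, no size splitting
theorem runFreshNone (gpn : Int) (gpg : Option Int) (hn : ∀ n : Nat, (some ((n : Nat) : Int) : Option Int) ≠ gpg)
    (y : String) (tail : List String) :
    ∀ (k : Nat), 1 ≤ k → ∀ (G t : Int) (node : String), y ≠ node → ∀ (gl sl : List Int) (bl : List Bool),
    List.foldl (pvAStep gpn gpg) (G, t, node, gl, sl, bl) (List.replicate k y ++ tail)
    = List.foldl (pvAStep gpn gpg)
        (G + 1, ((k - 1 : Nat) : Int) + 1, y,
         gl ++ (List.range k).map (fun _ => G + 1),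
         sl ++ (List.range k).map (fun j => ((j : Nat) : Int)),
         bl ++ (List.range k).map (fun j => decide (((j : Nat) : Int) < gpn))) tail := by
  intro k hk G t node hne gl sl bl
  obtain ⟨m, rfl⟩ : ∃ m, k = m + 1 := ⟨k - 1, by omega⟩
  rw [List.replicate_succ, List.cons_append, List.foldl_cons]
  have hstep : pvAStep gpn gpg (G, t, node, gl, sl, bl) y
      = (G + 1, (0 : Int) + 1, y, gl ++ [G + 1], sl ++ [(0 : Int)], bl ++ [decide ((0 : Int) < gpn)]) := by
    simp [pvAStep, hne]
  rw [hstep]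
  cases m with
  | zero => simp
  | succ m' =>
    rw [runANone gpn gpg hn y tail m' 1 ((0 : Int) + 1) (by norm_num)]
    have e1 : ((m' + 1 + 1 - 1 : Nat) : Int) + 1 = ((1 + m' : Nat) : Int) + 1 := by
      rw [show m' + 1 + 1 - 1 = 1 + m' from by omega]
    have e3 : gl ++ (List.range (m' + 1 + 1)).map (fun _ => G + 1)
        = (gl ++ [G + 1]) ++ (List.range (m' + 1)).map (fun _ => G + 1) := by
      rw [List.range_succ_eq_map (n := m' + 1)]
      simp only [List.map_cons, List.map_map, List.append_assoc, List.singleton_append]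
      exact congrArg (gl ++ ·) (congrArg₂ (· :: ·) rfl (List.map_congr_left (fun j _ => rfl)))
    have e4 : sl ++ (List.range (m' + 1 + 1)).map (fun j => ((j : Nat) : Int))
        = (sl ++ [(0 : Int)]) ++ (List.range (m' + 1)).map (fun j => ((1 + j : Nat) : Int)) := by
      rw [List.range_succ_eq_map (n := m' + 1)]
      simp only [List.map_cons, List.map_map, List.append_assoc, List.singleton_append, Nat.cast_zero]
      refine congrArg (sl ++ ·) (congrArg₂ (· :: ·) rfl ?_)
      refine (List.map_congr_left (fun j _ => ?_)).symm
      simp only [Function.comp_apply]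
      exact congrArg (fun n : Nat => ((n : Nat) : Int)) (show 1 + j = Nat.succ j from by omega)
    have e5 : bl ++ (List.range (m' + 1 + 1)).map (fun j => decide (((j : Nat) : Int) < gpn))
        = (bl ++ [decide ((0 : Int) < gpn)]) ++ (List.range (m' + 1)).map (fun j => decide (((1 + j : Nat) : Int) < gpn)) := by
      rw [List.range_succ_eq_map (n := m' + 1)]
      simp only [List.map_cons, List.map_map, List.append_assoc, List.singleton_append, Nat.cast_zero]
      refine congrArg (bl ++ ·) (congrArg₂ (· :: ·) rfl ?_)
      refine (List.map_congr_left (fun j _ => ?_)).symm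
      simp only [Function.comp_apply]
      exact congrArg (fun n : Nat => decide ((n : Int) < gpn)) (show 1 + j = Nat.succ j from by omega)
    rw [e1, e3, e4, e5]
-- final node / slot of A's state after a list of runs (proof-only bookkeeping)
def pvLastNode (node : String) (rs : List (String × Nat)) : String :=
  ((rs.getLast?).map Prod.fst).getD node

def pvLastSlotP (g : Nat) (t : Int) (rs : List (String × Nat)) : Int :=
  match rs.getLast? with
  | none => t
  | some r => (((r.2 - 1) % g : Nat) : Int) + 1

def pvLastSlotN (t : Int) (rs : List (String × Nat)) : Int :=
  match rs.getLast? with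
  | none => t
  | some r => ((r.2 - 1 : Nat) : Int) + 1

theorem pvLastNode_cons (node : String) (r : String × Nat) (rs : List (String × Nat)) :
    pvLastNode node (r :: rs) = pvLastNode r.1 rs := by
  cases rs with
  | nil => simp [pvLastNode]
  | cons a l =>
    rcases hgl : (a :: l).getLast? with _ | q
    · simp [List.getLast?_eq_none_iff] at hgl
    · simp [pvLastNode, hgl]

theorem pvLastSlotP_cons (g : Nat) (t : Int) (y : String) (k : Nat) (rs : List (String × Nat)) :
    pvLastSlotP g t ((y, k) :: rs) = pvLastSlotP g ((((k - 1) % g : Nat) : Int) + 1) rs := by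
  cases rs with
  | nil => simp [pvLastSlotP]
  | cons a l =>
    rcases hgl : (a :: l).getLast? with _ | q
    · simp [List.getLast?_eq_none_iff] at hgl
    · simp [pvLastSlotP, hgl]

theorem pvLastSlotN_cons (t : Int) (y : String) (k : Nat) (rs : List (String × Nat)) :
    pvLastSlotN t ((y, k) :: rs) = pvLastSlotN (((k - 1 : Nat) : Int) + 1) rs := by
  cases rs with
  | nil => simp [pvLastSlotN]
  | cons a l =>
    rcases hgl : (a :: l).getLast? with _ | q
    · simp [List.getLast?_eq_none_iff] at hgl
    · simp [pvLastSlotN, hgl]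

-- A over a list of runs, each entered on a node change, equals B's run-at-a-time fold (g > 0)
theorem mainPos (gpn : Int) (g : Nat) (hg : 0 < g) :
    ∀ (rs : List (String × Nat)) (node : String) (t : Int),
    List.IsChain (fun a b : String × Nat => a.1 ≠ b.1) rs →
    (∀ r ∈ rs, 1 ≤ r.2) →
    (∀ p ∈ rs.head?, p.1 ≠ node) →
    ∀ (G : Int) (gl sl : List Int) (bl : List Bool),
    List.foldl (pvAStep gpn (some (g : Int))) (G, t, node, gl, sl, bl) (rs.flatMap (fun r => List.replicate r.2 r.1))
    = ((List.foldl (pvBRun gpn (some g)) (G, gl, sl, bl) rs).1,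
       pvLastSlotP g t rs, pvLastNode node rs,
       (List.foldl (pvBRun gpn (some g)) (G, gl, sl, bl) rs).2.1,
       (List.foldl (pvBRun gpn (some g)) (G, gl, sl, bl) rs).2.2.1,
       (List.foldl (pvBRun gpn (some g)) (G, gl, sl, bl) rs).2.2.2) := by
  intro rs
  induction rs with
  | nil =>
    intro node t _ _ _ G gl sl bl
    simp [pvLastSlotP, pvLastNode]
  | cons r rs' ih =>
    obtain ⟨y, k⟩ := r
    intro node t hchain hpos hhead G gl sl bl
    have hk : 1 ≤ k := hpos (y, k) (by simp)
    have hne : y ≠ node := by simpa using hhead (y, k) (by simp)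
    have hch' : List.IsChain (fun a b : String × Nat => a.1 ≠ b.1) rs' := by
      cases hchain with
      | singleton _ => exact .nil
      | cons_cons hr h => exact h
    have hhead' : ∀ p ∈ rs'.head?, p.1 ≠ y := by
      cases hchain with
      | singleton _ => simp
      | cons_cons hr h =>
        intro p hp
        simp at hp
        subst hp
        exact Ne.symm hr
    have hpos' : ∀ r ∈ rs', 1 ≤ r.2 := fun r hrr => hpos r (by simp [hrr])
    rw [List.flatMap_cons,
      runFresh gpn g hg y (rs'.flatMap (fun r => List.replicate r.2 r.1)) k hk G t node hne gl sl bl,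
      ih y ((((k - 1) % g : Nat) : Int) + 1) hch' hpos' hhead',
      List.foldl_cons, pvLastSlotP_cons, pvLastNode_cons]
    have hB : pvBRun gpn (some g) (G, gl, sl, bl) (y, k)
        = (G + 1 + (((k - 1) / g : Nat) : Int),
           gl ++ (List.range k).map (fun j => G + 1 + ((j / g : Nat) : Int)),
           sl ++ (List.range k).map (fun j => ((j % g : Nat) : Int)),
           bl ++ (List.range k).map (fun j => decide (((j % g : Nat) : Int) < gpn))) := by
      simp [pvBRun]
    rw [hB]

-- A over a list of runs when the slot never matches gpus_per_group (None or negative)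
theorem mainNone (gpn : Int) (gpg : Option Int) (hn : ∀ n : Nat, (some ((n : Nat) : Int) : Option Int) ≠ gpg) :
    ∀ (rs : List (String × Nat)) (node : String) (t : Int),
    List.IsChain (fun a b : String × Nat => a.1 ≠ b.1) rs →
    (∀ r ∈ rs, 1 ≤ r.2) →
    (∀ p ∈ rs.head?, p.1 ≠ node) →
    ∀ (G : Int) (gl sl : List Int) (bl : List Bool),
    List.foldl (pvAStep gpn gpg) (G, t, node, gl, sl, bl) (rs.flatMap (fun r => List.replicate r.2 r.1))
    = ((List.foldl (pvBRun gpn none) (G, gl, sl, bl) rs).1,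
       pvLastSlotN t rs, pvLastNode node rs,
       (List.foldl (pvBRun gpn none) (G, gl, sl, bl) rs).2.1,
       (List.foldl (pvBRun gpn none) (G, gl, sl, bl) rs).2.2.1,
       (List.foldl (pvBRun gpn none) (G, gl, sl, bl) rs).2.2.2) := by
  intro rs
  induction rs with
  | nil =>
    intro node t _ _ _ G gl sl bl
    simp [pvLastSlotN, pvLastNode]
  | cons r rs' ih =>
    obtain ⟨y, k⟩ := r
    intro node t hchain hpos hhead G gl sl bl
    have hk : 1 ≤ k := hpos (y, k) (by simp)
    have hne : y ≠ node := by simpa using hhead (y, k) (by simp)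
    have hch' : List.IsChain (fun a b : String × Nat => a.1 ≠ b.1) rs' := by
      cases hchain with
      | singleton _ => exact .nil
      | cons_cons hr h => exact h
    have hhead' : ∀ p ∈ rs'.head?, p.1 ≠ y := by
      cases hchain with
      | singleton _ => simp
      | cons_cons hr h =>
        intro p hp
        simp at hp
        subst hp
        exact Ne.symm hr
    have hpos' : ∀ r ∈ rs', 1 ≤ r.2 := fun r hrr => hpos r (by simp [hrr])
    rw [List.flatMap_cons,
      runFreshNone gpn gpg hn y (rs'.flatMap (fun r => List.replicate r.2 r.1)) k hk G t node hne gl sl bl,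
      ih y (((k - 1 : Nat) : Int) + 1) hch' hpos' hhead',
      List.foldl_cons, pvLastSlotN_cons, pvLastNode_cons]
    have hB : pvBRun gpn none (G, gl, sl, bl) (y, k)
        = (G + 1,
           gl ++ (List.range k).map (fun _ => G + 1),
           sl ++ (List.range k).map (fun j => ((j : Nat) : Int)),
           bl ++ (List.range k).map (fun j => decide (((j : Nat) : Int) < gpn))) := by
      simp [pvBRun]
    rw [hB]

-- assembling the two ports on a nonempty list, away from gpus_per_group = 0
theorem AB_eq (gpn : Int) (gpg : Option Int) (x : String) (xs : List String)
    (hD : gpg ≠ some 0) :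
    get_group_list (x :: xs) gpn gpg = get_group_list_alt (x :: xs) gpn gpg := by
  obtain ⟨k0, rest, hr⟩ := pvRLE_shape x xs
  have hflat := pvRLE_flat (x :: xs)
  have hchain := pvRLE_chain (x :: xs)
  have hpos := pvRLE_pos (x :: xs)
  rw [hr] at hflat hchain hpos
  have hch' : List.IsChain (fun a b : String × Nat => a.1 ≠ b.1) rest := by
    cases hchain with
    | singleton _ => exact .nil
    | cons_cons hr' h => exact h
  have hhead' : ∀ p ∈ rest.head?, p.1 ≠ x := by
    cases hchain with
    | singleton _ => simp
    | cons_cons hr' h =>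
      intro p hp
      simp at hp
      subst hp
      exact Ne.symm hr'
  have hpos' : ∀ r ∈ rest, 1 ≤ r.2 := fun r hrr => hpos r (by simp [hrr])
  have hsplit : x :: xs = List.replicate (k0 + 1) x ++ rest.flatMap (fun r => List.replicate r.2 r.1) := by
    rw [← hflat, List.flatMap_cons]
  simp only [get_group_list, get_group_list_alt, hr]
  rw [hsplit]
  rcases gpg with _ | tval
  · have hn : ∀ n : Nat, (some ((n : Nat) : Int) : Option Int) ≠ (none : Option Int) := fun n => by simp
    rw [runANone gpn none hn x (rest.flatMap (fun r => List.replicate r.2 r.1)) k0 0 0 (by norm_num) 1 [] [] [],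
      mainNone gpn none hn rest x (((0 + k0 : Nat) : Int) + 1) hch' hpos' hhead' 1
        ([] ++ (List.range (k0 + 1)).map (fun _ => (1 : Int)))
        ([] ++ (List.range (k0 + 1)).map (fun j => ((0 + j : Nat) : Int)))
        ([] ++ (List.range (k0 + 1)).map (fun j => decide (((0 + j : Nat) : Int) < gpn))),
      List.foldl_cons]
    have hSt : pvBRun gpn none ((0 : Int), ([] : List Int), ([] : List Int), ([] : List Bool)) (x, k0 + 1)
        = ((1 : Int),
           [] ++ (List.range (k0 + 1)).map (fun _ => (1 : Int)),
           [] ++ (List.range (k0 + 1)).map (fun j => ((0 + j : Nat) : Int)),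
           [] ++ (List.range (k0 + 1)).map (fun j => decide (((0 + j : Nat) : Int) < gpn))) := by
      simp [pvBRun]
    rw [hSt]
  · by_cases h0 : 0 < tval
    · have hg : 0 < tval.toNat := by omega
      have hgt : tval = ((tval.toNat : Nat) : Int) := by omega
      rw [show (match (some tval : Option Int) with
            | some t => if 0 < t then some t.toNat else none
            | none => none) = if 0 < tval then some tval.toNat else (none : Option Nat) from rfl,
        if_pos h0]
      rw [show (some tval : Option Int) = some ((tval.toNat : Nat) : Int) from by rw [← hgt]]
      rw [runA gpn tval.toNat hg x (rest.flatMap (fun r => List.replicate r.2 r.1)) k0 0 0 (by norm_num) (by omega) 1 [] [] [],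
        mainPos gpn tval.toNat hg rest x ((((0 + k0) % tval.toNat : Nat) : Int) + 1) hch' hpos' hhead'
          (1 + (((0 + k0) / tval.toNat : Nat) : Int))
          ([] ++ (List.range (k0 + 1)).map (fun j => 1 + (((0 + j) / tval.toNat : Nat) : Int)))
          ([] ++ (List.range (k0 + 1)).map (fun j => (((0 + j) % tval.toNat : Nat) : Int)))
          ([] ++ (List.range (k0 + 1)).map (fun j => decide ((((0 + j) % tval.toNat : Nat) : Int) < gpn))),
        List.foldl_cons]
      have hSt : pvBRun gpn (some tval.toNat) ((0 : Int), ([] : List Int), ([] : List Int), ([] : List Bool)) (x, k0 + 1)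
          = (1 + (((0 + k0) / tval.toNat : Nat) : Int),
             [] ++ (List.range (k0 + 1)).map (fun j => 1 + (((0 + j) / tval.toNat : Nat) : Int)),
             [] ++ (List.range (k0 + 1)).map (fun j => (((0 + j) % tval.toNat : Nat) : Int)),
             [] ++ (List.range (k0 + 1)).map (fun j => decide ((((0 + j) % tval.toNat : Nat) : Int) < gpn))) := by
        simp [pvBRun]
      rw [hSt]
    · have htne : tval ≠ 0 := by intro h; exact hD (by rw [h])
      have hn : ∀ n : Nat, (some ((n : Nat) : Int) : Option Int) ≠ some tval := by
        intro n h
        simp only [Option.some.injEq] at h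
        omega
      rw [show (match (some tval : Option Int) with
            | some t => if 0 < t then some t.toNat else none
            | none => none) = if 0 < tval then some tval.toNat else (none : Option Nat) from rfl,
        if_neg h0]
      rw [runANone gpn (some tval) hn x (rest.flatMap (fun r => List.replicate r.2 r.1)) k0 0 0 (by norm_num) 1 [] [] [],
        mainNone gpn (some tval) hn rest x (((0 + k0 : Nat) : Int) + 1) hch' hpos' hhead' 1
          ([] ++ (List.range (k0 + 1)).map (fun _ => (1 : Int)))
          ([] ++ (List.range (k0 + 1)).map (fun j => ((0 + j : Nat) : Int)))
          ([] ++ (List.range (k0 + 1)).map (fun j => decide (((0 + j : Nat) : Int) < gpn))),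
        List.foldl_cons]
      have hSt : pvBRun gpn none ((0 : Int), ([] : List Int), ([] : List Int), ([] : List Bool)) (x, k0 + 1)
          = ((1 : Int),
             [] ++ (List.range (k0 + 1)).map (fun _ => (1 : Int)),
             [] ++ (List.range (k0 + 1)).map (fun j => ((0 + j : Nat) : Int)),
             [] ++ (List.range (k0 + 1)).map (fun j => decide (((0 + j : Nat) : Int) < gpn))) := by
        simp [pvBRun]
      rw [hSt]

-- A's fold only appends to the group list
theorem foldA_gl_prefix (gpn : Int) (gpg : Option Int) :
    ∀ (ys : List String) (st : Int × Int × String × List Int × List Int × List Bool),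
    ∃ t, (List.foldl (pvAStep gpn gpg) st ys).2.2.2.1 = st.2.2.2.1 ++ t := by
  intro ys
  induction ys with
  | nil => intro st; exact ⟨[], by simp⟩
  | cons y ys ih =>
    intro st
    obtain ⟨G, s, nd, gl, sl, bl⟩ := st
    obtain ⟨t, ht⟩ := ih (pvAStep gpn gpg (G, s, nd, gl, sl, bl) y)
    rw [List.foldl_cons, ht]
    by_cases hc : (y ≠ nd ∨ some s = gpg)
    · refine ⟨[G + 1] ++ t, ?_⟩
      have hstep : pvAStep gpn gpg (G, s, nd, gl, sl, bl) y
          = (G + 1, (0 : Int) + 1, y, gl ++ [G + 1], sl ++ [(0 : Int)], bl ++ [decide ((0 : Int) < gpn)]) := by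
        simp only [pvAStep]
        rw [if_pos hc]
      rw [hstep, List.append_assoc]
    · refine ⟨[G] ++ t, ?_⟩
      have hstep : pvAStep gpn gpg (G, s, nd, gl, sl, bl) y
          = (G, s + 1, nd, gl ++ [G], sl ++ [s], bl ++ [decide (s < gpn)]) := by
        simp only [pvAStep]
        rw [if_neg hc]
      rw [hstep, List.append_assoc]

-- B's fold only appends to the group list
theorem foldB_gl_prefix (gpn : Int) (g : Option Nat) :
    ∀ (rs : List (String × Nat)) (st : Int × List Int × List Int × List Bool),
    ∃ t, (List.foldl (pvBRun gpn g) st rs).2.1 = st.2.1 ++ t := by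
  intro rs
  induction rs with
  | nil => intro st; exact ⟨[], by simp⟩
  | cons r rs ih =>
    intro st
    obtain ⟨t, ht⟩ := ih (pvBRun gpn g st r)
    rw [List.foldl_cons, ht]
    obtain ⟨B, gl, sl, bl⟩ := st
    cases g with
    | none => exact ⟨(List.range r.2).map (fun _ => B + 1) ++ t, by simp [pvBRun]⟩
    | some gg => exact ⟨(List.range r.2).map (fun j => B + 1 + ((j / gg : Nat) : Int)) ++ t, by simp [pvBRun]⟩

-- ===== VERDICT (by name: the statement is the Claim_ definition above) =====
theorem get_group_list_spec : Claim_unchanged_get_group_list := by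
  intro l gpn gpg _ hpre hD
  have hD' : gpg ≠ some 0 := fun h => hD h
  cases l with
  | nil => exact absurd rfl hpre
  | cons x xs => exact AB_eq gpn gpg x xs hD'
theorem get_group_list_changed : Claim_changed_get_group_list := by unfold Claim_changed_get_group_list; decide
theorem get_group_list_tight : Claim_exact_get_group_list := by
  intro l gpn gpg _ hpre hD
  have hD0 : gpg = some 0 := hD
  subst hD0
  cases l with
  | nil => exact absurd rfl hpre
  | cons x xs =>
    intro heq
    have h1 : (get_group_list (x :: xs) gpn (some 0)).1 = (get_group_list_alt (x :: xs) gpn (some 0)).1 := by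
      rw [heq]
    have hA1 : pvAStep gpn (some 0) (1, 0, x, [], [], []) x
        = (2, (0 : Int) + 1, x, [2], [(0 : Int)], [decide ((0 : Int) < gpn)]) := by
      norm_num [pvAStep]
    obtain ⟨tA, htA⟩ := foldA_gl_prefix gpn (some 0) xs (pvAStep gpn (some 0) (1, 0, x, [], [], []) x)
    have hAgl : (get_group_list (x :: xs) gpn (some 0)).1 = 2 :: tA := by
      simp only [get_group_list, List.foldl_cons]
      rw [htA, hA1]
      rfl
    obtain ⟨k0, rest, hr⟩ := pvRLE_shape x xs
    obtain ⟨tB, htB⟩ := foldB_gl_prefix gpn none rest (pvBRun gpn none (0, [], [], []) (x, k0 + 1))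
    have hBgl : (get_group_list_alt (x :: xs) gpn (some 0)).1
        = List.replicate (k0 + 1) (1 : Int) ++ tB := by
      simp only [get_group_list_alt]
      norm_num
      rw [hr, List.foldl_cons, htB]
      have : (pvBRun gpn none ((0 : Int), ([] : List Int), ([] : List Int), ([] : List Bool)) (x, k0 + 1)).2.1
          = List.map (fun _ => (1 : Int)) (List.range (k0 + 1)) := by
        simp [pvBRun]
      rw [this]
      simp
    rw [hAgl, hBgl, List.replicate_succ] at h1
    simp at h1
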